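-- pv_equiv track=rewrite | github.com/ONSdigital/ssdc-rm-toolbox | toolbox/qid_checksum_validator.py | find_nearby_valid_qids
-- ===== SOURCE A (Python) =====
-- def generate_checksum_digits(code: str, modulus: int, factor: int) -> int:
--     remainder = ord(code[0])
--     for char in code[1:]:
--         ascii_value = ord(char)
--         remainder = ((remainder * factor) + ascii_value) % modulus
--     return remainder % modulus
--
-- def find_nearby_valid_qids(code: str, modulus: int, factor: int):
--     nearby_qids = []
--     code_component = code[:-2]
--     actual_checksum_digits = code[-2:]
--     for index, char in reversed(list(enumerate(code_component))):
--         for attempt_value in range(ord('0'), ord('9') + 1):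
--             nearby_code = code_component[:index] + chr(attempt_value) + code_component[index + 1:]
--             attempt_checksum = generate_checksum_digits(nearby_code, modulus, factor)
--             if str(attempt_checksum).zfill(2) == actual_checksum_digits:
--                 nearby_qids.append((nearby_code + actual_checksum_digits, index))
--     return nearby_qids
-- ===== SOURCE B (Python) =====
-- def find_nearby_valid_qids(code: str, modulus: int, factor: int):
--     # Return value identical to A; computes each substituted checksum via an O(1)
--     # modular delta from a precomputed base checksum and factor powers.
--     nearby_qids = []
--     code_component = code[:-2]
--     actual_checksum_digits = code[-2:]
--     n = len(code_component)
--     if n == 0: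
--         return nearby_qids
--     # pw[i] = factor**(n-1-i) % modulus
--     pw = [0] * n
--     pw[n - 1] = 1 % modulus
--     for i in range(n - 2, -1, -1):
--         pw[i] = (pw[i + 1] * factor) % modulus
--     base = 0
--     for ch in code_component:
--         base = (base * factor + ord(ch)) % modulus
--     for index in range(n - 1, -1, -1):
--         original = ord(code_component[index])
--         for attempt_value in range(48, 58):
--             attempt_checksum = (base + (attempt_value - original) * pw[index]) % modulus
--             if str(attempt_checksum).zfill(2) == actual_checksum_digits:
--                 nearby_code = code_component[:index] + chr(attempt_value) + code_component[index + 1:]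
--                 nearby_qids.append((nearby_code + actual_checksum_digits, index))
--     return nearby_qids
-- ===== Notes on version B (the rewrite author's own statement) =====
-- stated objective: faster
-- what changed: B precomputes the base checksum and a table of factor powers mod modulus once, then evaluates each single-digit substitution's checksum with an O(1) modular delta instead of re-running the full Horner checksum over the whole string for every attempt.
import Mathlib
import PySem

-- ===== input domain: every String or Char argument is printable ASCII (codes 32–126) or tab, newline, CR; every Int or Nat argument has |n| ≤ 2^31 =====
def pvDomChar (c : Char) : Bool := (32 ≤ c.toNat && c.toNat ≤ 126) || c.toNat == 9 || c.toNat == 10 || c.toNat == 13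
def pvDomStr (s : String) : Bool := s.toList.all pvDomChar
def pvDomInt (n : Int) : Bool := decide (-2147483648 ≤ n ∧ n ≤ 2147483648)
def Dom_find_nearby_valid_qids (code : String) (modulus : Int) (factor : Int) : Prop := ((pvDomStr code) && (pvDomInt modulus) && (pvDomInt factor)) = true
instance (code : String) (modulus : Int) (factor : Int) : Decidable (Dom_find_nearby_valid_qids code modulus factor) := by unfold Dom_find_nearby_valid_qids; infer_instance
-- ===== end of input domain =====

-- B replaces A's per-substitution O(n) checksum recomputation by a precomputed base
-- checksum and factor-power table with an O(1) modular delta per attempted digit (objective: faster).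


-- ===== PORT A =====
def pvOrd (c : Char) : Int := (c.toNat : Int)

-- generate_checksum_digits; Python raises IndexError on "" (never reached from the entry), port returns 0 there
def pvGenChecksum (modulus factor : Int) : List Char → Int
  | [] => 0
  | c :: rest =>
      PySem.Int.mod
        (rest.foldl (fun r ch => PySem.Int.mod (r * factor + pvOrd ch) modulus) (pvOrd c))
        modulus

def find_nearby_valid_qids (code : String) (modulus : Int) (factor : Int) : List (String × Int) :=
  let cs := code.toList
  let comp := PySem.List.slice cs none (some (-2))
  let actual := PySem.List.slice cs (some (-2)) none
  ((PySem.List.enumerate comp 0).reverse).foldl (fun acc p =>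
    (PySem.List.pyRange 48 58 1).foldl (fun acc2 d =>
      let nearby := PySem.List.slice comp none (some p.1) ++ [Char.ofNat d.toNat] ++
        PySem.List.slice comp (some (p.1 + 1)) none
      if PySem.Chars.zfill (PySem.Int.toChars (pvGenChecksum modulus factor nearby)) 2 = actual
      then acc2 ++ [(String.ofList (nearby ++ actual), p.1)]
      else acc2) acc) []

-- ===== PORT B =====
-- pw built back to front: pw[n-1] = 1 % m, pw[i] = (pw[i+1] * factor) % m
def pvPows (modulus factor : Int) : Nat → List Int
  | 0 => [PySem.Int.mod 1 modulus]
  | k + 1 =>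
      PySem.Int.mod ((pvPows modulus factor k).headD 0 * factor) modulus :: pvPows modulus factor k

def find_nearby_valid_qids_alt (code : String) (modulus : Int) (factor : Int) : List (String × Int) :=
  let cs := code.toList
  let comp := PySem.List.slice cs none (some (-2))
  let actual := PySem.List.slice cs (some (-2)) none
  if comp.length = 0 then []
  else
    let pw := pvPows modulus factor (comp.length - 1)
    let base := comp.foldl (fun b ch => PySem.Int.mod (b * factor + pvOrd ch) modulus) 0
    (PySem.List.pyRange ((comp.length : Int) - 1) (-1) (-1)).foldl (fun acc i =>
      (PySem.List.pyRange 48 58 1).foldl (fun acc2 d =>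
        let chk := PySem.Int.mod
          (base + (d - pvOrd (PySem.List.pyGetD comp i ' ')) * PySem.List.pyGetD pw i 0) modulus
        if PySem.Chars.zfill (PySem.Int.toChars chk) 2 = actual
        then
          let nearby := PySem.List.slice comp none (some i) ++ [Char.ofNat d.toNat] ++
            PySem.List.slice comp (some (i + 1)) none
          acc2 ++ [(String.ofList (nearby ++ actual), i)]
        else acc2) acc) []

-- ===== PRECONDITION & SPEC =====
-- Pre_ excludes only inputs where Python A raises ZeroDivisionError: modulus = 0 with a
-- nonempty code component (len(code) ≥ 3); B raises there too.
def Pre_find_nearby_valid_qids (code : String) (modulus : Int) (factor : Int) : Prop :=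
  code.toList.length ≤ 2 ∨ modulus ≠ 0
-- (modulus = 0 reaches Python's 'remainder % modulus' only when the code component is nonempty:
-- code "00" with modulus 0 still returns [], while any code of length ≥ 3 raises ZeroDivisionError)
instance (code : String) (modulus : Int) (factor : Int) : Decidable (Pre_find_nearby_valid_qids code modulus factor) := by unfold Pre_find_nearby_valid_qids; infer_instance

def pvWitness_find_nearby_valid_qids : String × Int × Int := ("abc07", 11, 3)

def Spec_find_nearby_valid_qids (code : String) (modulus : Int) (factor : Int) (out : List (String × Int)) : Prop := out = find_nearby_valid_qids_alt code modulus factor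
instance (code : String) (modulus : Int) (factor : Int) (out : List (String × Int)) : Decidable (Spec_find_nearby_valid_qids code modulus factor out) := by unfold Spec_find_nearby_valid_qids; infer_instance

-- ===== CLAIM (what is proved, stated in full; the proofs are below) =====
def Claim_equal_find_nearby_valid_qids : Prop := ∀ (code : String) (modulus : Int) (factor : Int), Dom_find_nearby_valid_qids code modulus factor → Pre_find_nearby_valid_qids code modulus factor → Spec_find_nearby_valid_qids code modulus factor (find_nearby_valid_qids code modulus factor)

-- ===== LEMMAS AND PROOFS =====

theorem pv_dvd_mod_sub (a m : Int) : m ∣ PySem.Int.mod a m - a := by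
  refine ⟨-(PySem.Int.floordiv a m), ?_⟩
  have h := PySem.Int.floordiv_mul_add_mod a m
  linarith [h]

theorem pv_mod_congr {a b m : Int} (h : m ∣ a - b) :
    PySem.Int.mod a m = PySem.Int.mod b m := by
  show Int.fmod a m = Int.fmod b m
  rw [Int.fmod_eq_fmod_iff_fmod_sub_eq_zero]
  exact (PySem.Int.mod_eq_zero_iff_dvd (a - b) m).mpr h

theorem pv_fold_cong (m f : Int) (s : List Char) : ∀ r r' : Int, m ∣ r - r' →
    m ∣ s.foldl (fun a ch => PySem.Int.mod (a * f + pvOrd ch) m) r -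
        s.foldl (fun a ch => a * f + pvOrd ch) r' := by
  induction s with
  | nil => intro r r' h; simpa using h
  | cons c t ih =>
      intro r r' h
      simp only [List.foldl_cons]
      apply ih
      have heq : PySem.Int.mod (r * f + pvOrd c) m - (r' * f + pvOrd c) =
          (PySem.Int.mod (r * f + pvOrd c) m - (r * f + pvOrd c)) + (r - r') * f := by ring
      rw [heq]
      exact dvd_add (pv_dvd_mod_sub _ m) (h.mul_right f)

theorem pv_fold_shift (f : Int) (t : List Char) : ∀ r r' : Int,
    t.foldl (fun a ch => a * f + pvOrd ch) r - t.foldl (fun a ch => a * f + pvOrd ch) r' =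
      (r - r') * f ^ t.length := by
  induction t with
  | nil => intro r r'; simp
  | cons c t ih =>
      intro r r'
      simp only [List.foldl_cons, List.length_cons]
      rw [ih]
      ring

theorem pv_pows_head (m f : Int) (k : Nat) :
    (pvPows m f k).headD 0 = (pvPows m f k).getD 0 0 := by
  cases k <;> rfl

theorem pv_pows_getD (m f : Int) : ∀ (k j : Nat), j ≤ k →
    m ∣ (pvPows m f k).getD j 0 - f ^ (k - j) := by
  intro k
  induction k with
  | zero =>
      intro j hj
      interval_cases j
      simpa using pv_dvd_mod_sub 1 m
  | succ k ih =>
      intro j hj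
      cases j with
      | zero =>
          simp only [pvPows, List.getD_cons_zero, Nat.sub_zero]
          rw [pv_pows_head]
          have h0 := ih 0 (Nat.zero_le k)
          simp only [Nat.sub_zero] at h0
          have heq : PySem.Int.mod ((pvPows m f k).getD 0 0 * f) m - f ^ (k + 1) =
              (PySem.Int.mod ((pvPows m f k).getD 0 0 * f) m - (pvPows m f k).getD 0 0 * f) +
              ((pvPows m f k).getD 0 0 - f ^ k) * f := by ring
          rw [heq]
          exact dvd_add (pv_dvd_mod_sub _ m) (h0.mul_right f)
      | succ j =>
          simp only [pvPows, List.getD_cons_succ, Nat.succ_sub_succ]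
          exact ih j (Nat.le_of_succ_le_succ hj)

theorem pv_chk_eq (m f : Int) (s : List Char) (hs : s ≠ []) :
    pvGenChecksum m f s = PySem.Int.mod (s.foldl (fun a ch => a * f + pvOrd ch) 0) m := by
  cases s with
  | nil => exact absurd rfl hs
  | cons c t =>
      simp only [pvGenChecksum, List.foldl_cons, zero_mul, zero_add]
      exact pv_mod_congr (pv_fold_cong m f t _ _ (by simp))

theorem pv_ord_chr (d : Int) (h1 : 48 ≤ d) (h2 : d < 58) : pvOrd (Char.ofNat d.toNat) = d := by
  have hk1 : 48 ≤ d.toNat := by omega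
  have hk2 : d.toNat < 58 := by omega
  have : pvOrd (Char.ofNat d.toNat) = (d.toNat : Int) := by
    interval_cases h : d.toNat <;> decide
  omega

-- the substituted checksum equals B's modular-delta formula
theorem pv_master (m f : Int) (comp : List Char) (k : Nat) (hk : k < comp.length)
    (d : Int) (h1 : 48 ≤ d) (h2 : d < 58) :
    pvGenChecksum m f (comp.take k ++ [Char.ofNat d.toNat] ++ comp.drop (k + 1)) =
      PySem.Int.mod
        ((comp.foldl (fun b ch => PySem.Int.mod (b * f + pvOrd ch) m) 0) +
          (d - pvOrd (comp.getD k ' ')) * ((pvPows m f (comp.length - 1)).getD k 0)) m := by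
  have hsub : comp.take k ++ [Char.ofNat d.toNat] ++ comp.drop (k + 1) ≠ [] := by simp
  rw [pv_chk_eq m f _ hsub]
  apply pv_mod_congr
  set pure := fun (a : Int) (ch : Char) => a * f + pvOrd ch with hpure
  have hcomp : comp = comp.take k ++ (comp[k] :: comp.drop (k + 1)) := by
    conv_lhs => rw [← List.take_append_drop k comp]
    rw [List.drop_eq_getElem_cons hk]
  have hlen : (comp.drop (k + 1)).length = comp.length - 1 - k := by
    simp [List.length_drop]; omega
  have hfold : ∀ x : Char, (comp.take k ++ x :: comp.drop (k + 1)).foldl pure 0 =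
      (comp.drop (k + 1)).foldl pure (pure ((comp.take k).foldl pure 0) x) := by
    intro x; rw [List.foldl_append, List.foldl_cons]
  have hA := hfold (Char.ofNat d.toNat)
  have hB := hfold comp[k]
  rw [← hcomp] at hB
  have hdiff :
      (comp.take k ++ [Char.ofNat d.toNat] ++ comp.drop (k + 1)).foldl pure 0 -
        comp.foldl pure 0 =
      (d - pvOrd comp[k]) * f ^ (comp.length - 1 - k) := by
    have hre : comp.take k ++ [Char.ofNat d.toNat] ++ comp.drop (k + 1) =
        comp.take k ++ (Char.ofNat d.toNat :: comp.drop (k + 1)) := by simp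
    rw [hre, hA, hB, pv_fold_shift, hlen]
    simp only [hpure]
    rw [pv_ord_chr d h1 h2]
    ring
  have hbase : m ∣ comp.foldl (fun b ch => PySem.Int.mod (b * f + pvOrd ch) m) 0 -
      comp.foldl pure 0 := pv_fold_cong m f comp 0 0 (by simp)
  have hpw : m ∣ (pvPows m f (comp.length - 1)).getD k 0 - f ^ (comp.length - 1 - k) :=
    pv_pows_getD m f (comp.length - 1) k (by omega)
  have hget : comp.getD k ' ' = comp[k] := List.getD_eq_getElem comp ' ' hk
  rw [hget]
  obtain ⟨u, hu⟩ := hbase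
  obtain ⟨v, hv⟩ := hpw
  refine ⟨-u - (d - pvOrd comp[k]) * v, ?_⟩
  linear_combination hdiff - hu - (d - pvOrd comp[k]) * hv

-- A's and B's inner (digit) loops, as named proof-side bodies
def pvInnerA (m f : Int) (comp actual : List Char) (acc : List (String × Int)) (i : Int) :
    List (String × Int) :=
  (PySem.List.pyRange 48 58 1).foldl (fun acc2 d =>
    let nearby := PySem.List.slice comp none (some i) ++ [Char.ofNat d.toNat] ++
      PySem.List.slice comp (some (i + 1)) none
    if PySem.Chars.zfill (PySem.Int.toChars (pvGenChecksum m f nearby)) 2 = actual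
    then acc2 ++ [(String.ofList (nearby ++ actual), i)]
    else acc2) acc

def pvInnerB (m f : Int) (comp actual : List Char) (acc : List (String × Int)) (i : Int) :
    List (String × Int) :=
  (PySem.List.pyRange 48 58 1).foldl (fun acc2 d =>
    let chk := PySem.Int.mod
      ((comp.foldl (fun b ch => PySem.Int.mod (b * f + pvOrd ch) m) 0) +
        (d - pvOrd (PySem.List.pyGetD comp i ' ')) *
          PySem.List.pyGetD (pvPows m f (comp.length - 1)) i 0) m
    if PySem.Chars.zfill (PySem.Int.toChars chk) 2 = actual
    then
      let nearby := PySem.List.slice comp none (some i) ++ [Char.ofNat d.toNat] ++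
        PySem.List.slice comp (some (i + 1)) none
      acc2 ++ [(String.ofList (nearby ++ actual), i)]
    else acc2) acc

theorem pv_inner_eq (m f : Int) (comp actual : List Char) (acc : List (String × Int))
    (i : Int) (h0 : 0 ≤ i) (hn : i < (comp.length : Int)) :
    pvInnerA m f comp actual acc i = pvInnerB m f comp actual acc i := by
  obtain ⟨k, rfl⟩ : ∃ k : Nat, i = (k : Int) := ⟨i.toNat, by omega⟩
  have hk : k < comp.length := by exact_mod_cast hn
  unfold pvInnerA pvInnerB
  apply PySem.List.foldl_congr_mem
  intro acc2 d hd
  rw [PySem.List.mem_pyRange_one] at hd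
  have hslice1 : PySem.List.slice comp none (some (k : Int)) = comp.take k :=
    PySem.List.slice_to_natCast comp k
  have hslice2 : PySem.List.slice comp (some ((k : Int) + 1)) none = comp.drop (k + 1) := by
    have h : ((k : Int) + 1) = ((k + 1 : Nat) : Int) := by push_cast; ring
    rw [h, PySem.List.slice_from_natCast]
  have hget : PySem.List.pyGetD comp (k : Int) ' ' = comp.getD k ' ' := by
    simp
  have hgetpw : PySem.List.pyGetD (pvPows m f (comp.length - 1)) (k : Int) 0 =
      (pvPows m f (comp.length - 1)).getD k 0 := by
    simp
  simp only [hslice1, hslice2, hget, hgetpw]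
  rw [pv_master m f comp k hk d hd.1 hd.2]

theorem pv_main (m f : Int) (comp actual : List Char) :
    ((PySem.List.enumerate comp 0).reverse).foldl (fun acc p => pvInnerA m f comp actual acc p.1) [] =
      (if comp.length = 0 then ([] : List (String × Int))
       else ((PySem.List.pyRange ((comp.length : Int) - 1) (-1) (-1)).foldl
         (fun acc i => pvInnerB m f comp actual acc i) [])) := by
  by_cases hn : comp.length = 0
  · have hc : comp = [] := List.length_eq_zero_iff.mp hn
    subst hc
    simp [PySem.List.enumerate]
  · rw [if_neg hn]
    rw [← List.foldl_map (f := fun (p : Int × Char) => p.1)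
          (g := fun acc i => pvInnerA m f comp actual acc i)]
    rw [List.map_reverse, PySem.List.map_fst_enumerate, zero_add]
    have e1 : PySem.List.pyRange ((comp.length : Int) - 1) (-1) (-1) =
        (PySem.List.pyRange 0 (comp.length : Int) 1).reverse := by
      rw [PySem.List.pyRange_neg_one_eq_reverse]
      norm_num
    rw [e1]
    apply PySem.List.foldl_congr_mem
    intro acc i hi
    rw [List.mem_reverse, PySem.List.mem_pyRange_one] at hi
    exact pv_inner_eq m f comp actual acc i hi.1 hi.2

-- ===== VERDICT (by name: the statement is the Claim_ definition above) =====
theorem find_nearby_valid_qids_spec : Claim_equal_find_nearby_valid_qids := by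
  intro code m f _hdom _hpre
  unfold Spec_find_nearby_valid_qids
  show find_nearby_valid_qids code m f = find_nearby_valid_qids_alt code m f
  exact pv_main m f (PySem.List.slice code.toList none (some (-2)))
    (PySem.List.slice code.toList (some (-2)) none)
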